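-- pv_equiv track=rewrite | github.com/manoflearning/nps-senti | scrape/scrapers/fmkorea.py | _clean_article_text
-- ===== SOURCE A (Python) =====
-- def _clean_article_text(text: str, link: str) -> str:
--     link = link or ""
--     filtered = []
--     for raw_line in text.splitlines():
--         stripped = raw_line.strip()
--         if not stripped:
--             if filtered and filtered[-1] != "":
--                 filtered.append("")
--             continue
--         if stripped.startswith(link) or stripped.startswith(link.rstrip('/')):
--             continue
--         if stripped.endswith(" 복사") and stripped[:-3].startswith("https://www.fmkorea.com"):
--             continue
--         if stripped == "복사":
--             continue
--         filtered.append(stripped)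
--
--     cleaned = []
--     prev_blank = False
--     for line in filtered:
--         if not line:
--             if not prev_blank:
--                 cleaned.append("")
--             prev_blank = True
--         else:
--             cleaned.append(line)
--             prev_blank = False
--
--     return "\n".join(cleaned).strip()
-- ===== SOURCE B (Python) =====
-- def _is_noise(line: str, base: str, alt: str) -> bool:
--     return (line.startswith(base) or line.startswith(alt)
--             or (line.endswith(" \ubcf5\uc0ac") and line[:-3].startswith("https://www.fmkorea.com"))
--             or line == "\ubcf5\uc0ac")
--
--
-- def _clean_article_text(text: str, link: str) -> str:
--     base = link or ""
--     alt = base.rstrip('/')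
--     paragraphs = []
--     current = []
--     for raw_line in text.splitlines():
--         line = raw_line.strip()
--         if not line:
--             if current:
--                 paragraphs.append(current)
--                 current = []
--         elif not _is_noise(line, base, alt):
--             current.append(line)
--     if current:
--         paragraphs.append(current)
--     return "\n\n".join("\n".join(p) for p in paragraphs)
-- ===== Notes on version B (the rewrite author's own statement) =====
-- stated objective: simpler
-- what changed: A's two passes (a filter loop that inserts deduplicated blank separator lines, then a prev_blank state machine that re-collapses blanks before a join-and-strip) are replaced by one pass that groups kept stripped lines into paragraphs and joins the paragraphs with '\n\n', so no blank sentinel lines, no second loop and no final strip are needed.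
import Mathlib
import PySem

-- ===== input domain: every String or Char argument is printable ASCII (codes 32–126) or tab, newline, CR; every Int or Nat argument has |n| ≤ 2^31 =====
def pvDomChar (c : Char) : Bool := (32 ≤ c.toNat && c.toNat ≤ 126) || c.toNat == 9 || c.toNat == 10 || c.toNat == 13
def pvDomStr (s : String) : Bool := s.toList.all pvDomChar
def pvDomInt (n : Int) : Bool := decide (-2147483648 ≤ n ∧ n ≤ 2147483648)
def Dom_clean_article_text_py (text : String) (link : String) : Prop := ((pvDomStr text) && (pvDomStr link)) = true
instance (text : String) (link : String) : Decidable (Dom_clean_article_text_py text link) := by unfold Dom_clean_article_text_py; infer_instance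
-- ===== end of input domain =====

-- B replaces A's two-pass blank/prev_blank state machine by a single pass that groups kept
-- lines into paragraphs and joins them with "\n\n" (objective: simpler decomposition, same cost).


-- ===== PORT A =====
-- hand port of Python's s.rstrip('/') (PySem has no one-sided strip-with-chars); exact: drops trailing '/'
def pyRstripSlash (s : List Char) : List Char :=
  (s.reverse.dropWhile (· == '/')).reverse

-- body of A's first loop (over splitlines), state = filtered
def cleanA_step1 (link : List Char) (filtered : List (List Char)) (raw : List Char) : List (List Char) :=
  let stripped := PySem.Chars.strip raw
  if stripped = [] then
    (if filtered ≠ [] ∧ filtered.getLast? ≠ some [] then filtered ++ [[]] else filtered)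
  else if PySem.Chars.startswith stripped link || PySem.Chars.startswith stripped (pyRstripSlash link) then
    filtered
  else if PySem.Chars.endswith stripped (" 복사".toList) &&
          PySem.Chars.startswith (PySem.Chars.slice stripped none (some (-3))) ("https://www.fmkorea.com".toList) then
    filtered
  else if stripped = "복사".toList then
    filtered
  else filtered ++ [stripped]

-- body of A's second loop, state = (cleaned, prev_blank)
def cleanA_step2 (st : List (List Char) × Bool) (line : List Char) : List (List Char) × Bool :=
  if line = [] then
    (if st.2 = false then st.1 ++ [[]] else st.1, true)
  else (st.1 ++ [line], false)

def clean_article_text_py (text : String) (link : String) : String :=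
  let linkC := if link.toList = [] then [] else link.toList   -- link = link or ""
  let filtered := (PySem.Chars.splitlines text.toList).foldl (cleanA_step1 linkC) []
  let cleaned := (filtered.foldl cleanA_step2 ([], false)).1
  String.ofList (PySem.Chars.strip (PySem.Chars.join ['\n'] cleaned))

-- ===== PORT B =====
def cleanB_noise (line base alt : List Char) : Bool :=
  PySem.Chars.startswith line base || PySem.Chars.startswith line alt ||
  (PySem.Chars.endswith line (" 복사".toList) &&
   PySem.Chars.startswith (PySem.Chars.slice line none (some (-3))) ("https://www.fmkorea.com".toList)) ||
  decide (line = "복사".toList)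

-- body of B's single loop, state = (paragraphs, current)
def cleanB_step (base alt : List Char) (st : List (List (List Char)) × List (List Char)) (raw : List Char) :
    List (List (List Char)) × List (List Char) :=
  let line := PySem.Chars.strip raw
  if line = [] then
    (if st.2 ≠ [] then (st.1 ++ [st.2], []) else st)
  else if cleanB_noise line base alt then st
  else (st.1, st.2 ++ [line])

def clean_article_text_py_alt (text : String) (link : String) : String :=
  let base := if link.toList = [] then [] else link.toList   -- link or ""
  let alt := pyRstripSlash base
  let st := (PySem.Chars.splitlines text.toList).foldl (cleanB_step base alt) ([], [])
  let paras := if st.2 ≠ [] then st.1 ++ [st.2] else st.1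
  String.ofList (PySem.Chars.join ['\n', '\n'] (paras.map (PySem.Chars.join ['\n'])))

-- ===== PRECONDITION & SPEC =====
def Spec_clean_article_text_py (text : String) (link : String) (out : String) : Prop := out = clean_article_text_py_alt text link
instance (text : String) (link : String) (out : String) : Decidable (Spec_clean_article_text_py text link out) := by unfold Spec_clean_article_text_py; infer_instance

-- ===== CLAIM (what is proved, stated in full; the proofs are below) =====
def Claim_equal_clean_article_text_py : Prop := ∀ (text : String) (link : String), Dom_clean_article_text_py text link → Spec_clean_article_text_py text link (clean_article_text_py text link)

-- ===== LEMMAS AND PROOFS =====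

-- a stripped, nonblank line
def GoodLine (l : List Char) : Prop := l ≠ [] ∧ PySem.Chars.strip l = l

def GoodPara (p : List (List Char)) : Prop := p ≠ [] ∧ ∀ l ∈ p, GoodLine l

-- "\n".join-ready shape of A's filtered list: paragraphs separated by single blank lines
def jb : List (List (List Char)) → List (List Char)
  | [] => []
  | [p] => p
  | p :: ps => p ++ [[]] ++ jb ps

-- the invariant tying A's loop-1 state to B's state
def CleanInv (f : List (List Char)) (st : List (List (List Char)) × List (List Char)) : Prop :=
  (∀ p ∈ st.1, GoodPara p) ∧ (∀ l ∈ st.2, GoodLine l) ∧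
  ((st.2 = [] ∧ ((st.1 = [] ∧ f = []) ∨ (st.1 ≠ [] ∧ f = jb st.1 ++ [[]]))) ∨
   (st.2 ≠ [] ∧ f = jb (st.1 ++ [st.2])))

theorem jb_nil : jb [] = [] := rfl
theorem jb_singleton (p : List (List Char)) : jb [p] = p := rfl
theorem jb_cons (p : List (List Char)) (ps : List (List (List Char))) (h : ps ≠ []) :
    jb (p :: ps) = p ++ [[]] ++ jb ps := by
  cases ps with
  | nil => exact absurd rfl h
  | cons q qs => rfl

theorem jb_concat (ps : List (List (List Char))) (c : List (List Char)) (h : ps ≠ []) :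
    jb (ps ++ [c]) = jb ps ++ [[]] ++ c := by
  induction ps with
  | nil => exact absurd rfl h
  | cons p ps ih =>
    cases ps with
    | nil => simp [jb]
    | cons q qs =>
      rw [List.cons_append, jb_cons p ((q :: qs) ++ [c]) (by simp),
        jb_cons p (q :: qs) (by simp), ih (by simp)]
      simp

-- ---- strip facts ----

theorem head_dropWhile_not (p : Char → Bool) (l : List Char) (c : Char)
    (h : (l.dropWhile p).head? = some c) : p c = false := by
  have := List.head?_dropWhile_not p l
  rw [h] at this
  exact this

theorem head_strip_not_space (s : List Char) (c : Char)
    (h : (PySem.Chars.strip s).head? = some c) : PySem.Chars.isspace c = false := by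
  have hpre : PySem.Chars.strip s <+: PySem.Chars.lstrip s := by
    simp only [PySem.Chars.strip, PySem.Chars.rstrip]
    simpa using (List.dropWhile_suffix (l := (PySem.Chars.lstrip s).reverse) PySem.Chars.isspace).reverse
  obtain ⟨u, hu⟩ := hpre
  have hne : PySem.Chars.strip s ≠ [] := by
    intro hh; rw [hh] at h; simp at h
  have : (PySem.Chars.lstrip s).head? = some c := by
    rw [← hu, List.head?_append_of_ne_nil _ hne, h]
  exact head_dropWhile_not _ _ _ this

theorem last_strip_not_space (s : List Char) (c : Char)
    (h : (PySem.Chars.strip s).getLast? = some c) : PySem.Chars.isspace c = false := by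
  have : ((PySem.Chars.lstrip s).reverse.dropWhile PySem.Chars.isspace).head? = some c := by
    simpa only [PySem.Chars.strip, PySem.Chars.rstrip, List.getLast?_reverse] using h
  exact head_dropWhile_not _ _ _ this

theorem dropWhile_of_head (s : List Char)
    (h : ∀ c, s.head? = some c → PySem.Chars.isspace c = false) :
    s.dropWhile PySem.Chars.isspace = s := by
  cases s with
  | nil => rfl
  | cons c t => simp [h c rfl]

theorem lstrip_of_head (s : List Char)
    (h : ∀ c, s.head? = some c → PySem.Chars.isspace c = false) :
    PySem.Chars.lstrip s = s :=
  dropWhile_of_head s h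

theorem rstrip_of_last (s : List Char)
    (h : ∀ c, s.getLast? = some c → PySem.Chars.isspace c = false) :
    PySem.Chars.rstrip s = s := by
  simp only [PySem.Chars.rstrip]
  rw [dropWhile_of_head s.reverse (by intro c hc; exact h c (by rwa [List.head?_reverse] at hc))]
  simp

-- NWE X: X is nonempty with non-whitespace first and last characters
def NWE (X : List Char) : Prop :=
  X ≠ [] ∧ (∀ c, X.head? = some c → PySem.Chars.isspace c = false) ∧
    (∀ c, X.getLast? = some c → PySem.Chars.isspace c = false)

theorem strip_of_nwe (X : List Char) (h : NWE X) : PySem.Chars.strip X = X := by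
  obtain ⟨-, hh, hl⟩ := h
  simp only [PySem.Chars.strip]
  rw [lstrip_of_head X hh, rstrip_of_last X hl]

theorem strip_idem (s : List Char) :
    PySem.Chars.strip (PySem.Chars.strip s) = PySem.Chars.strip s := by
  by_cases h : PySem.Chars.strip s = []
  · rw [h]; rfl
  · exact strip_of_nwe _ ⟨h, head_strip_not_space s, last_strip_not_space s⟩

theorem good_nwe (l : List Char) (h : GoodLine l) : NWE l := by
  obtain ⟨hne, hs⟩ := h
  refine ⟨hne, ?_, ?_⟩
  · intro c hc; exact head_strip_not_space l c (by rw [hs]; exact hc)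
  · intro c hc; exact last_strip_not_space l c (by rw [hs]; exact hc)

theorem strip_append_newline (X : List Char) (h : NWE X) :
    PySem.Chars.strip (X ++ ['\n']) = X := by
  obtain ⟨hne, hh, hl⟩ := h
  simp only [PySem.Chars.strip]
  rw [lstrip_of_head (X ++ ['\n'])
    (by intro c hc; rw [List.head?_append_of_ne_nil _ hne] at hc; exact hh c hc)]
  simp only [PySem.Chars.rstrip, List.reverse_append, List.reverse_singleton,
    List.singleton_append, List.dropWhile_cons]
  rw [if_pos (show PySem.Chars.isspace '\n' = true from rfl)]
  rw [dropWhile_of_head X.reverse (by intro c hc; exact hl c (by rwa [List.head?_reverse] at hc))]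
  simp

theorem nwe_append (a m b : List Char) (ha : NWE a) (hb : NWE b) : NWE (a ++ m ++ b) := by
  obtain ⟨hane, hah, -⟩ := ha
  obtain ⟨hbne, -, hbl⟩ := hb
  refine ⟨by simp [hane], ?_, ?_⟩
  · intro c hc
    rw [List.append_assoc, List.head?_append_of_ne_nil _ hane] at hc
    exact hah c hc
  · intro c hc
    rw [List.getLast?_append_of_ne_nil _ hbne] at hc
    exact hbl c hc

theorem nwe_join (sep : List Char) (xs : List (List Char)) (hne : xs ≠ [])
    (h : ∀ x ∈ xs, NWE x) : NWE (PySem.Chars.join sep xs) := by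
  induction xs with
  | nil => exact absurd rfl hne
  | cons x xs ih =>
    cases xs with
    | nil => simpa [PySem.Chars.join_singleton] using h x (by simp)
    | cons y ys =>
      rw [PySem.Chars.join_cons_cons]
      exact nwe_append _ _ _ (h x (by simp)) (ih (by simp) (fun z hz => h z (by simp [hz])))

theorem nwe_good_join (p : List (List Char)) (h : GoodPara p) :
    NWE (PySem.Chars.join ['\n'] p) :=
  nwe_join _ _ h.1 (fun l hl => good_nwe l (h.2 l hl))

-- ---- join lemmas ----

theorem join_append (sep : List Char) (xs ys : List (List Char)) (hx : xs ≠ []) (hy : ys ≠ []) :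
    PySem.Chars.join sep (xs ++ ys) = PySem.Chars.join sep xs ++ sep ++ PySem.Chars.join sep ys := by
  induction xs with
  | nil => exact absurd rfl hx
  | cons x xs ih =>
    cases xs with
    | nil =>
      obtain ⟨y, ys, rfl⟩ := List.exists_cons_of_ne_nil hy
      rw [List.singleton_append, PySem.Chars.join_cons_cons, PySem.Chars.join_singleton]
    | cons z zs =>
      have hsh : (x :: z :: zs) ++ ys = x :: z :: (zs ++ ys) := by simp
      rw [hsh, PySem.Chars.join_cons_cons,
        show z :: (zs ++ ys) = (z :: zs) ++ ys from by simp, ih (by simp),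
        PySem.Chars.join_cons_cons]
      simp

theorem jb_ne (ps : List (List (List Char))) (hne : ps ≠ [])
    (h : ∀ p ∈ ps, GoodPara p) : jb ps ≠ [] := by
  cases ps with
  | nil => exact absurd rfl hne
  | cons p ps =>
    cases ps with
    | nil => exact (h p (by simp)).1
    | cons q qs => rw [jb_cons p _ (by simp)]; simp [(h p (by simp)).1]

theorem head_jb (ps : List (List (List Char))) (hne : ps ≠ [])
    (h : ∀ p ∈ ps, GoodPara p) : ∀ x, (jb ps).head? = some x → x ≠ [] := by
  cases ps with
  | nil => exact absurd rfl hne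
  | cons p ps =>
    have hp := h p (by simp)
    intro x hx
    have hx' : p.head? = some x := by
      cases ps with
      | nil => simpa [jb_singleton] using hx
      | cons q qs =>
        rw [jb_cons p _ (by simp), List.append_assoc, List.head?_append_of_ne_nil _ hp.1] at hx
        exact hx
    exact (hp.2 x (List.mem_of_mem_head? hx')).1

theorem last_jb (ps : List (List (List Char))) (hne : ps ≠ [])
    (h : ∀ p ∈ ps, GoodPara p) : ∀ x, (jb ps).getLast? = some x → x ≠ [] := by
  induction ps with
  | nil => exact absurd rfl hne
  | cons p ps ih =>
    intro x hx
    cases ps with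
    | nil =>
      rw [jb_singleton] at hx
      exact ((h p (by simp)).2 x (List.mem_of_getLast? hx)).1
    | cons q qs =>
      have hjb : jb (q :: qs) ≠ [] := jb_ne _ (by simp) (fun r hr => h r (by simp [hr]))
      rw [jb_cons p _ (by simp), List.append_assoc,
        List.getLast?_append_of_ne_nil _ (by simp),
        List.getLast?_append_of_ne_nil _ hjb] at hx
      exact ih (by simp) (fun r hr => h r (by simp [hr])) x hx

-- no two adjacent blank lines
def NoTwoBlank (a b : List Char) : Prop := ¬(a = [] ∧ b = [])

theorem chain_all (l : List (List Char)) (h : ∀ x ∈ l, x ≠ []) :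
    List.IsChain NoTwoBlank l := by
  induction l with
  | nil => simp
  | cons x t ih =>
    rw [List.isChain_cons]
    exact ⟨fun y _ hy => (h x (by simp)) hy.1, ih (fun z hz => h z (by simp [hz]))⟩

theorem chain_jb (ps : List (List (List Char))) (h : ∀ p ∈ ps, GoodPara p) :
    List.IsChain NoTwoBlank (jb ps) := by
  induction ps with
  | nil => simp [jb_nil]
  | cons p ps ih =>
    have hp := h p (by simp)
    cases ps with
    | nil =>
      rw [jb_singleton]
      exact chain_all p (fun l hl => (hp.2 l hl).1)
    | cons q qs =>
      have hgood : ∀ r ∈ q :: qs, GoodPara r := fun r hr => h r (by simp [hr])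
      rw [jb_cons p _ (by simp)]
      refine List.IsChain.append
        (List.IsChain.append (chain_all p (fun l hl => (hp.2 l hl).1)) (by simp) ?_)
        (ih hgood) ?_
      · intro x hx y hy
        exact fun hc => ((hp.2 x (List.mem_of_getLast? (by simpa using hx))).1) hc.1
      · intro x hx y hy
        rw [List.getLast?_append_of_ne_nil p (by simp), List.getLast?_singleton] at hx
        simp only [Option.mem_def, Option.some.injEq] at hx
        exact fun hc => (head_jb _ (by simp) hgood y hy) hc.2

theorem loop2_id (l : List (List Char)) :
    ∀ (acc : List (List Char)) (pb : Bool), List.IsChain NoTwoBlank l →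
    (pb = true → ∀ x, l.head? = some x → x ≠ []) →
    (l.foldl cleanA_step2 (acc, pb)).1 = acc ++ l := by
  induction l with
  | nil => intro acc pb _ _; simp
  | cons x t ih =>
    intro acc pb hch hpb
    rw [List.isChain_cons] at hch
    by_cases hx : x = []
    · subst hx
      have hpbf : pb = false := by
        cases pb with
        | false => rfl
        | true => exact absurd rfl (hpb rfl [] rfl)
      subst hpbf
      have hstep : cleanA_step2 (acc, false) [] = (acc ++ [[]], true) := by
        simp [cleanA_step2]
      rw [List.foldl_cons, hstep,
        ih (acc ++ [[]]) true hch.2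
          (fun _ y hy => fun hc => (hch.1 y (by simp [hy]) ⟨rfl, hc⟩))]
      simp
    · have hstep : cleanA_step2 (acc, pb) x = (acc ++ [x], false) := by
        simp [cleanA_step2, hx]
      rw [List.foldl_cons, hstep, ih (acc ++ [x]) false hch.2 (by simp)]
      simp

-- joining A's filtered shape equals B's paragraph join
theorem join_jb_eq (ps : List (List (List Char))) (hne : ps ≠ [])
    (h : ∀ p ∈ ps, GoodPara p) :
    PySem.Chars.join ['\n'] (jb ps) =
      PySem.Chars.join ['\n', '\n'] (ps.map (PySem.Chars.join ['\n'])) := by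
  induction ps with
  | nil => exact absurd rfl hne
  | cons p ps ih =>
    cases ps with
    | nil => simp [jb_singleton, PySem.Chars.join_singleton]
    | cons q qs =>
      have hgood : ∀ r ∈ q :: qs, GoodPara r := fun r hr => h r (by simp [hr])
      have hjb : jb (q :: qs) ≠ [] := jb_ne _ (by simp) hgood
      obtain ⟨z, zs, hz⟩ := List.exists_cons_of_ne_nil hjb
      rw [jb_cons p _ (by simp), List.append_assoc,
        join_append _ _ _ (h p (by simp)).1 (by simp),
        show ([[]] ++ jb (q :: qs) : List (List Char)) = [] :: jb (q :: qs) from by simp, hz,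
        PySem.Chars.join_cons_cons, ← hz, ih (by simp) hgood]
      simp [PySem.Chars.join_cons_cons]

-- the nonblank branch of A's step is B's noise test
theorem stepA_nonblank (link : List Char) (f : List (List Char)) (raw : List Char)
    (h : PySem.Chars.strip raw ≠ []) :
    cleanA_step1 link f raw =
      if cleanB_noise (PySem.Chars.strip raw) link (pyRstripSlash link) then f
      else f ++ [PySem.Chars.strip raw] := by
  simp only [cleanA_step1, cleanB_noise, if_neg h]
  set s := PySem.Chars.strip raw
  by_cases h1 : (PySem.Chars.startswith s link || PySem.Chars.startswith s (pyRstripSlash link)) = true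
  · simp [h1]
  · by_cases h2 : (PySem.Chars.endswith s (" 복사".toList) &&
        PySem.Chars.startswith (PySem.Chars.slice s none (some (-3))) ("https://www.fmkorea.com".toList)) = true
    · simp at h2
      simp [h1, h2]
    · by_cases h3 : s = "복사".toList
      · simp at h2
        simp [h3]
      · simp at h2 h3
        simp [h1, h3]

theorem inv_step (link : List Char) (f : List (List Char)) (st) (raw : List Char)
    (h : CleanInv f st) :
    CleanInv (cleanA_step1 link f raw) (cleanB_step link (pyRstripSlash link) st raw) := by
  obtain ⟨h1, h2, h3⟩ := h
  by_cases hse : PySem.Chars.strip raw = []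
  · -- blank line
    have hA : cleanA_step1 link f raw =
        (if f ≠ [] ∧ f.getLast? ≠ some [] then f ++ [[]] else f) := by
      simp [cleanA_step1, hse]
    have hB : cleanB_step link (pyRstripSlash link) st raw =
        (if st.2 ≠ [] then (st.1 ++ [st.2], []) else st) := by
      simp [cleanB_step, hse]
    rw [hA, hB]
    rcases h3 with ⟨hc, ⟨hc1, hfa⟩ | ⟨hc1, hfa⟩⟩ | ⟨hc, hf⟩
    · -- everything empty
      rw [if_neg (by simp [hfa]), if_neg (by simp [hc])]
      exact ⟨h1, h2, Or.inl ⟨hc, Or.inl ⟨hc1, hfa⟩⟩⟩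
    · -- trailing blank already present
      rw [if_neg (by simp [hfa]), if_neg (by simp [hc])]
      exact ⟨h1, h2, Or.inl ⟨hc, Or.inr ⟨hc1, hfa⟩⟩⟩
    · -- flush current paragraph
      have hcur : GoodPara st.2 := ⟨hc, h2⟩
      have hgood : ∀ p ∈ st.1 ++ [st.2], GoodPara p := by
        intro p hp
        rcases List.mem_append.mp hp with hp | hp
        · exact h1 p hp
        · simpa [List.mem_singleton.mp hp] using hcur
      have hfx : f.getLast? = st.2.getLast? := by
        rw [hf]
        cases hst1 : st.1 with
        | nil => simp [jb_singleton]
        | cons a as =>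
          rw [jb_concat _ _ (by simp), List.append_assoc,
            List.getLast?_append_of_ne_nil _ (by simp)]
          rw [List.getLast?_append_of_ne_nil _ hc]
      obtain ⟨x, hx⟩ : ∃ x, st.2.getLast? = some x :=
        Option.isSome_iff_exists.mp (List.getLast?_isSome.mpr hc)
      have hxg : GoodLine x := h2 x (List.mem_of_getLast? hx)
      rw [if_pos ⟨by rw [hf]; exact jb_ne _ (by simp) hgood,
            by rw [hfx, hx]; simp [hxg.1]⟩,
        if_pos hc]
      refine ⟨hgood, by simp, Or.inl ⟨rfl, Or.inr ⟨by simp, ?_⟩⟩⟩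
      rw [hf]
  · -- nonblank line
    rw [stepA_nonblank link f raw hse]
    have hB : cleanB_step link (pyRstripSlash link) st raw =
        (if cleanB_noise (PySem.Chars.strip raw) link (pyRstripSlash link) then st
         else (st.1, st.2 ++ [PySem.Chars.strip raw])) := by
      simp only [cleanB_step, if_neg hse]
    rw [hB]
    by_cases hn : cleanB_noise (PySem.Chars.strip raw) link (pyRstripSlash link) = true
    · rw [if_pos hn, if_pos hn]
      exact ⟨h1, h2, h3⟩
    · rw [if_neg (by simp [hn]), if_neg (by simp [hn])]
      have hgl : GoodLine (PySem.Chars.strip raw) := ⟨hse, strip_idem raw⟩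
      have h2' : ∀ l ∈ st.2 ++ [PySem.Chars.strip raw], GoodLine l := by
        intro l hl
        rcases List.mem_append.mp hl with hl | hl
        · exact h2 l hl
        · simpa [List.mem_singleton.mp hl] using hgl
      refine ⟨h1, h2', Or.inr ⟨by simp, ?_⟩⟩
      rcases h3 with ⟨hc, ⟨hc1, hfa⟩ | ⟨hc1, hfa⟩⟩ | ⟨hc, hf⟩
      · rw [hfa, hc, hc1]; simp [jb_singleton]
      · rw [hfa, hc, jb_concat _ _ hc1]; simp
      · rw [hf]
        cases hst1 : st.1 with
        | nil => simp [jb_singleton]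
        | cons a as =>
          rw [jb_concat _ _ (by simp), jb_concat _ _ (by simp)]
          simp

theorem inv_fold (link : List Char) (raws : List (List Char)) :
    ∀ f st, CleanInv f st →
      CleanInv (raws.foldl (cleanA_step1 link) f) (raws.foldl (cleanB_step link (pyRstripSlash link)) st) := by
  induction raws with
  | nil => intro f st h; exact h
  | cons r rs ih => intro f st h; exact ih _ _ (inv_step link f st r h)

-- ===== VERDICT (by name: the statement is the Claim_ definition above) =====
theorem clean_article_text_py_spec : Claim_equal_clean_article_text_py := by
  intro text link _
  unfold Spec_clean_article_text_py
  simp only [clean_article_text_py, clean_article_text_py_alt]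
  set linkC := (if link.toList = [] then [] else link.toList) with hlc
  set raws := PySem.Chars.splitlines text.toList
  set f := raws.foldl (cleanA_step1 linkC) [] with hfdef
  set st := raws.foldl (cleanB_step linkC (pyRstripSlash linkC)) ([], []) with hstdef
  have hinv : CleanInv f st :=
    inv_fold linkC raws [] ([], []) ⟨by simp, by simp, Or.inl ⟨rfl, Or.inl ⟨rfl, rfl⟩⟩⟩
  obtain ⟨h1, h2, h3⟩ := hinv
  congr 1
  rcases h3 with ⟨hc, ⟨hc1, hfa⟩ | ⟨hc1, hfa⟩⟩ | ⟨hc, hf⟩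
  · -- everything empty
    rw [hfa, hc, hc1, if_neg (by simp)]
    simp [PySem.Chars.join_nil, show PySem.Chars.strip [] = [] from rfl]
  · -- trailing blank
    have hX : NWE (PySem.Chars.join ['\n'] (jb st.1)) := by
      rw [join_jb_eq st.1 hc1 h1]
      exact nwe_join _ _ (by simpa using hc1) (by
        intro x hx
        obtain ⟨p, hp, rfl⟩ := List.mem_map.mp hx
        exact nwe_good_join p (h1 p hp))
    rw [hfa, loop2_id _ [] false (by
        refine List.IsChain.append (chain_jb st.1 h1) (by simp) ?_
        intro x hx y hy
        exact fun hcon => (last_jb st.1 hc1 h1 x hx) hcon.1) (by simp),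
      List.nil_append, join_append _ _ _ (jb_ne st.1 hc1 h1) (by simp),
      PySem.Chars.join_singleton, List.append_nil, strip_append_newline _ hX,
      join_jb_eq st.1 hc1 h1, hc, if_neg (by simp)]
  · -- current paragraph open
    have hgood : ∀ p ∈ st.1 ++ [st.2], GoodPara p := by
      intro p hp
      rcases List.mem_append.mp hp with hp | hp
      · exact h1 p hp
      · simpa [List.mem_singleton.mp hp] using (⟨hc, h2⟩ : GoodPara st.2)
    rw [hf, loop2_id _ [] false (chain_jb _ hgood) (by simp), List.nil_append,
      strip_of_nwe _ (by
        rw [join_jb_eq _ (by simp) hgood]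
        exact nwe_join _ _ (by simp) (by
          intro x hx
          obtain ⟨p, hp, rfl⟩ := List.mem_map.mp hx
          exact nwe_good_join p (hgood p hp))),
      join_jb_eq _ (by simp) hgood, if_pos (by simp [hc])]
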